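-- pv_equiv track=rewrite | github.com/peacekurella/SequenceAssembly | assembler.py | get_start_nodes
-- ===== SOURCE A (Python) =====
-- def get_start_nodes(edges):
--     node_degree = {}
--     for edge in edges:
--         prefix = edge[0]
--         suffix = edge[1]
--         p_count = node_degree.setdefault(prefix, 0)
--         node_degree[prefix] = p_count + 1
--         s_count = node_degree.setdefault(suffix, 0)
--         node_degree[suffix] = s_count - 1
--
--     degree_node = {v: k for k, v in node_degree.items() if v != 0}
--
--     start = None
--
--     if len(degree_node) > 0:
--         start_stop = sorted(degree_node, reverse=True)
--         start = degree_node[start_stop[0]]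
--
--     # Return the nodes, edges and the starting nodes in the graph.
--     return start
-- ===== SOURCE B (Python) =====
-- def get_start_nodes(edges):
--     deg = {}
--     for prefix, suffix in edges:
--         deg[prefix] = deg.get(prefix, 0) + 1
--         deg[suffix] = deg.get(suffix, 0) - 1
--
--     best = None
--     for node, d in deg.items():
--         if d != 0 and (best is None or d >= best[1]):
--             best = (node, d)
--
--     return best[0] if best is not None else None
-- ===== Notes on version B (the rewrite author's own statement) =====
-- stated objective: simpler
-- what changed: B drops A's value-keyed inverted dict and the sorted() call: it selects the start node in a single forward pass over the degree dict, keeping the node with the maximum nonzero net degree (>= so the last-inserted tie wins, which is exactly A's overwrite-then-max behaviour).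
import Mathlib
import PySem

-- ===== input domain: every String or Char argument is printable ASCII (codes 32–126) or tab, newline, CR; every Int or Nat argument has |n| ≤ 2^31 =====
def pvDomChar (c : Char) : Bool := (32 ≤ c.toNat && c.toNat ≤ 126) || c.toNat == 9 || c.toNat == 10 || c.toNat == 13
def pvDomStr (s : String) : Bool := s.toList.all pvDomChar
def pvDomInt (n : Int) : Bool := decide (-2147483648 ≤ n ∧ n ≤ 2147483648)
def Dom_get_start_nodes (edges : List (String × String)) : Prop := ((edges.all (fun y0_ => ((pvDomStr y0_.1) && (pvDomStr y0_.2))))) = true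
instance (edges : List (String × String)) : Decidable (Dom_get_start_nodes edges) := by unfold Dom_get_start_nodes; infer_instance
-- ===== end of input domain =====

-- B replaces A's inverted dict + sorted() with one forward max pass over the degree dict (objective: simpler).

-- ===== PORT A =====
-- per-edge loop body of A: setdefault then overwrite, prefix +1 then suffix -1
def degStepA (d : PySem.Dict String Int) (e : String × String) : PySem.Dict String Int :=
  let p_count := (d.get? e.1).getD 0
  let d1 := (d.setdefault e.1 0).insert e.1 (p_count + 1)
  let s_count := (d1.get? e.2).getD 0
  (d1.setdefault e.2 0).insert e.2 (s_count - 1)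

def get_start_nodes (edges : List (String × String)) : Option String :=
  let node_degree := edges.foldl degStepA PySem.Dict.empty
  let degree_node := node_degree.items.foldl
    (fun (m : PySem.Dict Int String) kv => if kv.2 ≠ 0 then m.insert kv.2 kv.1 else m)
    PySem.Dict.empty
  if degree_node.size > 0 then
    match PySem.List.sorted degree_node.keys (fun x => x) true with
    | [] => none                     -- unreachable: degree_node nonempty
    | k :: _ => degree_node.get? k   -- degree_node[start_stop[0]]: key always present
  else none

-- ===== PORT B =====
-- per-edge loop body of B: get-with-default then store
def degStepB (d : PySem.Dict String Int) (e : String × String) : PySem.Dict String Int :=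
  let d1 := d.insert e.1 (d.getD e.1 0 + 1)
  d1.insert e.2 (d1.getD e.2 0 - 1)

-- 'if d != 0 and (best is None or d >= best[1]): best = (node, d)'
def selStep (acc : Option (String × Int)) (kv : String × Int) : Option (String × Int) :=
  if kv.2 != 0 && (match acc with | none => true | some b => decide (b.2 ≤ kv.2)) then some kv else acc

def get_start_nodes_alt (edges : List (String × String)) : Option String :=
  let deg := edges.foldl degStepB PySem.Dict.empty
  let best := deg.items.foldl selStep none
  best.map Prod.fst

-- ===== PRECONDITION & SPEC =====
def Spec_get_start_nodes (edges : List (String × String)) (out : Option String) : Prop := out = get_start_nodes_alt edges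
instance (edges : List (String × String)) (out : Option String) : Decidable (Spec_get_start_nodes edges out) := by unfold Spec_get_start_nodes; infer_instance

-- ===== CLAIM (what is proved, stated in full; the proofs are below) =====
def Claim_equal_get_start_nodes : Prop := ∀ (edges : List (String × String)), Dom_get_start_nodes edges → Spec_get_start_nodes edges (get_start_nodes edges)

-- ===== LEMMAS AND PROOFS =====

-- setdefault-then-overwrite is a plain overwrite
theorem setdefault_insert_eq (d : PySem.Dict String Int) (k : String) (v : Int) :
    (d.setdefault k 0).insert k v = d.insert k v := by
  by_cases h : d.contains k = true
  · rw [PySem.Dict.setdefault_of_contains d 0 h]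
  · rw [PySem.Dict.setdefault_of_not_contains d 0 (by simpa using h),
      PySem.Dict.insert_insert_self]

theorem degStep_eq (d : PySem.Dict String Int) (e : String × String) : degStepA d e = degStepB d e := by
  simp [degStepA, degStepB, setdefault_insert_eq, PySem.Dict.getD_eq_get?_getD]

-- the inner dict of A, as a function of the item list
def invDict (L : List (String × Int)) : PySem.Dict Int String :=
  L.foldl (fun m kv => if kv.2 ≠ 0 then m.insert kv.2 kv.1 else m) PySem.Dict.empty

-- invariant: B's running best is exactly the maximal key of A's inverted dict with its stored node
theorem sel_inv (L : List (String × Int)) :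
    match L.foldl selStep none with
    | none => invDict L = PySem.Dict.empty
    | some (n0, m) => (invDict L).get? m = some n0 ∧ m ∈ (invDict L).keys ∧
        ∀ k ∈ (invDict L).keys, k ≤ m := by
  induction L using List.reverseRecOn with
  | nil => simp [invDict]
  | append_singleton M x ih =>
    obtain ⟨xn, xd⟩ := x
    have hfold : invDict (M ++ [(xn, xd)]) =
        (if xd ≠ 0 then (invDict M).insert xd xn else invDict M) := by
      simp [invDict, List.foldl_append]
    rw [List.foldl_append, List.foldl_cons, List.foldl_nil, hfold]
    by_cases hz : xd = 0
    · simpa [selStep, hz] using ih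
    · cases hacc : M.foldl selStep none with
      | none =>
        rw [hacc] at ih
        simp only [ih, if_pos hz, selStep]
        rw [if_pos (by simp [hz])]
        refine ⟨PySem.Dict.get?_insert_self _ _ _, ?_, ?_⟩
        · exact (PySem.Dict.mem_keys_insert _ _ _ _).mpr (Or.inl rfl)
        · intro k hk
          rcases (PySem.Dict.mem_keys_insert _ _ _ _).mp hk with h | h
          · omega
          · simp [PySem.Dict.keys_empty] at h
      | some b =>
        obtain ⟨n0, m⟩ := b
        rw [hacc] at ih
        obtain ⟨hget, hmem, hmax⟩ := ih
        simp only [selStep, if_pos hz]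
        by_cases hge : m ≤ xd
        · rw [if_pos (by simp [hz, hge])]
          refine ⟨PySem.Dict.get?_insert_self _ _ _, ?_, ?_⟩
          · exact (PySem.Dict.mem_keys_insert _ _ _ _).mpr (Or.inl rfl)
          · intro k hk
            rcases (PySem.Dict.mem_keys_insert _ _ _ _).mp hk with h | h
            · omega
            · exact le_trans (hmax k h) hge
        · rw [if_neg (by simp [hge])]
          refine ⟨?_, ?_, ?_⟩
          · rw [PySem.Dict.get?_insert_of_ne _ _ (by omega)]; exact hget
          · exact (PySem.Dict.mem_keys_insert _ _ _ _).mpr (Or.inr hmem)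
          · intro k hk
            rcases (PySem.Dict.mem_keys_insert _ _ _ _).mp hk with h | h
            · omega
            · exact hmax k h

theorem sel_eq (L : List (String × Int)) :
    (if (invDict L).size > 0 then
      match PySem.List.sorted (invDict L).keys (fun x => x) true with
      | [] => none
      | k :: _ => (invDict L).get? k
     else none) = (L.foldl selStep none).map Prod.fst := by
  have hinv := sel_inv L
  cases hacc : L.foldl selStep none with
  | none =>
    rw [hacc] at hinv
    simp only [hinv]
    simp [PySem.Dict.size_empty]
  | some b =>
    obtain ⟨n0, m⟩ := b
    rw [hacc] at hinv
    obtain ⟨hget, hmem, hmax⟩ := hinv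
    have hk : (invDict L).keys ≠ [] := fun h => by simp [h] at hmem
    have hsz : (invDict L).size > 0 := by
      have h1 : (invDict L).keys.length > 0 := List.length_pos_iff.mpr hk
      simpa [PySem.Dict.keys, PySem.Dict.size] using h1
    rw [if_pos hsz]
    cases hs : PySem.List.sorted (invDict L).keys (fun x => x) true with
    | nil => exact absurd ((PySem.List.sorted_eq_nil_iff _ _ _).mp hs) hk
    | cons h t =>
      have hhm : h ∈ (invDict L).keys := by
        have hmem' : h ∈ PySem.List.sorted (invDict L).keys (fun x => x) true := by
          simp [hs]
        exact (PySem.List.mem_sorted _ _ _ _).mp hmem'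
      have hge : ∀ y ∈ (invDict L).keys, y ≤ h :=
        fun y hy => PySem.List.key_head_sorted_rev_ge _ _ hs y hy
      have heq : h = m := le_antisymm (hmax h hhm) (hge m hmem)
      simp [heq, hget]

-- ===== VERDICT (by name: the statement is the Claim_ definition above) =====
theorem get_start_nodes_spec : Claim_equal_get_start_nodes := by
  intro edges _
  show get_start_nodes edges = get_start_nodes_alt edges
  unfold get_start_nodes get_start_nodes_alt
  have hd : edges.foldl degStepA PySem.Dict.empty = edges.foldl degStepB PySem.Dict.empty :=
    PySem.List.foldl_congr_mem edges degStepA degStepB _ (fun acc e _ => degStep_eq acc e)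
  rw [hd]
  exact sel_eq _
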